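-- pv_equiv track=rewrite | github.com/wyk18703232953/myResearch | codeComplex/data/filteredData/python/nlogn/python_nlogn_0585.py | logic2
-- ===== SOURCE A (Python) =====
-- def logic2(n, m, grid):
--     dp = [[-1 for _ in range(m)] for _ in range(n)]
--     dp2 = [[-1 for _ in range(m)] for _ in range(n)]
--     for i in range(n):
--         s = grid[i]
--         for j in range(m):
--             if s[j] == '.':
--                 dp[i][j] = -1
--             else:
--                 dp[i][j] = s[j]
--
--     for i in range(0, n - 2):
--         for j in range(0, m - 2):
--             p = 0
--             c = 0
--             for k in range(i, i + 3):
--                 for h in range(j, j + 3):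
--                     p += 1
--                     if p != 5:
--                         if dp[k][h] == '#':
--                             c += 1
--
--             if c == 8:
--                 p = 0
--                 for k in range(i, i + 3):
--                     for h in range(j, j + 3):
--                         p += 1
--                         if p != 5:
--                             dp2[k][h] = '#'
--
--     return "YES" if dp == dp2 else "NO"
-- ===== SOURCE B (Python) =====
-- def logic2(n, m, grid):
--     def full_ring(i, j):
--         return all(grid[k][h] == '#'
--                    for k in range(i, i + 3) for h in range(j, j + 3)
--                    if (k, h) != (i + 1, j + 1))
--
--     def covered(r, c):
--         return any(full_ring(i, j)
--                    for i in range(max(0, r - 2), min(r, n - 3) + 1)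
--                    for j in range(max(0, c - 2), min(c, m - 3) + 1)
--                    if (i + 1, j + 1) != (r, c))
--
--     def cell_ok(r, c):
--         ch = grid[r][c]
--         return ch == '.' or (ch == '#' and covered(r, c))
--
--     return "YES" if all([cell_ok(r, c) for r in range(n) for c in range(m)]) else "NO"
-- ===== Notes on version B (the rewrite author's own statement) =====
-- stated objective: alternative
-- what changed: B eliminates A's dp/dp2 reconstruction grids and whole-grid comparison: it scans cells once, answers NO on any non-'.'/non-'#' char, and for each '#' cell queries directly whether some in-bounds 3x3 block whose center is not that cell has its full 8-cell ring of '#'.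
import Mathlib
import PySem

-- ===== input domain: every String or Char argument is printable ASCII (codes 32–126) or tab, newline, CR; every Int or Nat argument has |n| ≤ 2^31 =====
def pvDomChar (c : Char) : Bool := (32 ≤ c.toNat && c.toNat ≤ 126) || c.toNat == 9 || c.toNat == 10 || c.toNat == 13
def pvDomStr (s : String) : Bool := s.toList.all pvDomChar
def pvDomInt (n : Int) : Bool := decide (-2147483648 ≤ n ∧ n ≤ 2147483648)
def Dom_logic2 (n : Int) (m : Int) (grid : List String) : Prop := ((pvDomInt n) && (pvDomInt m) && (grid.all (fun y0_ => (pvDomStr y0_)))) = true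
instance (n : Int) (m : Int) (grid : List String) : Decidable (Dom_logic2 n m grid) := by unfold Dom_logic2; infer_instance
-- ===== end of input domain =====

-- B removes A's dp/dp2 reconstruction grids and whole-grid comparison: it scans cells once and queries ring-block coverage per '#' cell; equal return value proved on Pre_.

-- ===== PORT A =====
-- dp cells: Python stores -1 or a char; ported as Option Char (none = -1).
def pvCellA (s : String) (j : Int) : Option Char :=
  let ch := (PySem.Str.pyGet? s j).getD ' '
  if ch = '.' then none else some ch

def pvDpGet (d : List (List (Option Char))) (k h : Int) : Option Char :=
  PySem.List.pyGetD (PySem.List.pyGetD d k []) h none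

def pvDpSet (d : List (List (Option Char))) (k h : Int) (v : Option Char) : List (List (Option Char)) :=
  PySem.List.pySetD d k (PySem.List.pySetD (PySem.List.pyGetD d k []) h v)

-- the p/c counting loop of A over one 3x3 block
def pvCountRing (dp : List (List (Option Char))) (i j : Int) : Int × Int :=
  (PySem.List.pyRange i (i+3) 1).foldl (fun pc k =>
    (PySem.List.pyRange j (j+3) 1).foldl (fun pc h =>
      let p := pc.1 + 1
      (p, if p ≠ 5 ∧ pvDpGet dp k h = some '#' then pc.2 + 1 else pc.2)) pc) (0, 0)

-- the marking loop of A over one 3x3 block (second p counter)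
def pvMark (d2 : List (List (Option Char))) (i j : Int) : List (List (Option Char)) :=
  ((PySem.List.pyRange i (i+3) 1).foldl (fun st k =>
    (PySem.List.pyRange j (j+3) 1).foldl (fun st h =>
      let p := st.1 + 1
      (p, if p ≠ 5 then pvDpSet st.2 k h (some '#') else st.2)) st) (0, d2)).2

def logic2 (n : Int) (m : Int) (grid : List String) : String :=
  let dp := (PySem.List.pyRange 0 n 1).map (fun i =>
    let s := (PySem.List.pyGet? grid i).getD ""
    (PySem.List.pyRange 0 m 1).map (fun j => pvCellA s j))
  let dp2init := (PySem.List.pyRange 0 n 1).map (fun _ =>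
    (PySem.List.pyRange 0 m 1).map (fun _ => (none : Option Char)))
  let dp2 := (PySem.List.pyRange 0 (n-2) 1).foldl (fun d2 i =>
    (PySem.List.pyRange 0 (m-2) 1).foldl (fun d2 j =>
      if (pvCountRing dp i j).2 = 8 then pvMark d2 i j else d2) d2) dp2init
  if dp = dp2 then "YES" else "NO"

-- ===== PORT B =====
def pvCellAt (grid : List String) (k h : Int) : Char :=
  (PySem.Str.pyGet? ((PySem.List.pyGet? grid k).getD "") h).getD ' '

def pvFullRing (grid : List String) (i j : Int) : Bool :=
  (PySem.List.pyRange i (i+3) 1).all (fun k =>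
    (PySem.List.pyRange j (j+3) 1).all (fun h =>
      if (k, h) = (i+1, j+1) then true else pvCellAt grid k h == '#'))

def pvCovered (n m : Int) (grid : List String) (r c : Int) : Bool :=
  (PySem.List.pyRange (max 0 (r-2)) (min r (n-3) + 1) 1).any (fun i =>
    (PySem.List.pyRange (max 0 (c-2)) (min c (m-3) + 1) 1).any (fun j =>
      if (i+1, j+1) = (r, c) then false else pvFullRing grid i j))

def pvCellOk (n m : Int) (grid : List String) (r c : Int) : Bool :=
  let ch := pvCellAt grid r c
  ch == '.' || (ch == '#' && pvCovered n m grid r c)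

def logic2_alt (n : Int) (m : Int) (grid : List String) : String :=
  if ((PySem.List.pyRange 0 n 1).flatMap (fun r =>
       (PySem.List.pyRange 0 m 1).map (fun c => pvCellOk n m grid r c))).all (fun b => b)
  then "YES" else "NO"

-- ===== PRECONDITION & SPEC =====
-- Pre_ excludes exactly the inputs on which A raises IndexError: fewer than n rows,
-- or one of the first n rows shorter than m.
def Pre_logic2 (n : Int) (m : Int) (grid : List String) : Prop :=
  n ≤ (grid.length : Int) ∧ ∀ s ∈ grid.take n.toNat, m ≤ PySem.Str.len s
instance (n : Int) (m : Int) (grid : List String) : Decidable (Pre_logic2 n m grid) := by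
  unfold Pre_logic2; infer_instance

def pvWitness_logic2 : Int × Int × List String := (3, 3, ["###", "#.#", "###"])

def Spec_logic2 (n : Int) (m : Int) (grid : List String) (out : String) : Prop := out = logic2_alt n m grid
instance (n : Int) (m : Int) (grid : List String) (out : String) : Decidable (Spec_logic2 n m grid out) := by unfold Spec_logic2; infer_instance

-- ===== CLAIM (what is proved, stated in full; the proofs are below) =====
def Claim_equal_logic2 : Prop := ∀ (n : Int) (m : Int) (grid : List String), Dom_logic2 n m grid → Pre_logic2 n m grid → Spec_logic2 n m grid (logic2 n m grid)

-- ===== LEMMAS AND PROOFS =====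

lemma pyRange3 (i : Int) : PySem.List.pyRange i (i+3) 1 = [i, i+1, i+2] := by
  rw [PySem.List.pyRange_one_cons (by omega), PySem.List.pyRange_one_cons (by omega),
      PySem.List.pyRange_one_cons (by omega), PySem.List.pyRange_one_eq_nil (by omega)]
  simp; omega

def pvSetList (d : List (List (Option Char))) (ps : List (Int × Int)) : List (List (Option Char)) :=
  ps.foldl (fun d p => pvDpSet d p.1 p.2 (some '#')) d

lemma pvMark_eq (d : List (List (Option Char))) (i j : Int) :
    pvMark d i j = pvSetList d [(i,j),(i,j+1),(i,j+2),(i+1,j),(i+1,j+2),(i+2,j),(i+2,j+1),(i+2,j+2)] := by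
  simp [pvMark, pvSetList, pyRange3, List.foldl]

set_option maxHeartbeats 1000000 in
lemma countRing_eq_eight (dp : List (List (Option Char))) (i j : Int) :
    ((pvCountRing dp i j).2 = 8) ↔
    (pvDpGet dp i j = some '#' ∧ pvDpGet dp i (j+1) = some '#' ∧ pvDpGet dp i (j+2) = some '#' ∧
     pvDpGet dp (i+1) j = some '#' ∧ pvDpGet dp (i+1) (j+2) = some '#' ∧
     pvDpGet dp (i+2) j = some '#' ∧ pvDpGet dp (i+2) (j+1) = some '#' ∧ pvDpGet dp (i+2) (j+2) = some '#') := by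
  have hstep : forall (b : Prop) (inst : Decidable b) (x : Int), (if b then x+1 else x) = x + (if b then 1 else 0) := by
    intro b inst x; split_ifs <;> ring
  simp only [pvCountRing, pyRange3, List.foldl]

  simp only [hstep]
  norm_num
  constructor
  · intro h
    split_ifs at h <;> simp_all
  · rintro ⟨h1,h2,h3,h4,h5,h6,h7,h8⟩
    simp [h1,h2,h3,h4,h5,h6,h7,h8]

lemma pyGetD_pySetD {α : Type} (xs : List α) (i r : Int) (v d : α)
    (hi0 : 0 ≤ i) (hr0 : 0 ≤ r) (hr : r < (xs.length : Int)) :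
    PySem.List.pyGetD (PySem.List.pySetD xs i v) r d = if r = i then v else PySem.List.pyGetD xs r d := by
  rw [PySem.List.pySetD_of_nonneg xs v hi0,
      PySem.List.pyGetD_eq_getElem _ d hr0 (by simpa using hr),
      PySem.List.pyGetD_eq_getElem _ d hr0 hr, List.getElem_set]
  by_cases h : r = i
  · simp [h]
  · rw [if_neg (by omega), if_neg h]

lemma length_pvDpSet (d : List (List (Option Char))) (k h : Int) (v : Option Char) :
    (pvDpSet d k h v).length = d.length := by
  simp [pvDpSet, PySem.List.length_pySetD]

lemma rowlen_pvDpSet (d : List (List (Option Char))) (k h : Int) (v : Option Char) (M : Int)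
    (hk0 : 0 ≤ k) (hk : k < (d.length : Int)) (hrow : ∀ row ∈ d, (row.length : Int) = M) :
    ∀ row ∈ pvDpSet d k h v, (row.length : Int) = M := by
  intro row hr
  rw [pvDpSet, PySem.List.pySetD_of_nonneg] at hr
  · rcases List.mem_or_eq_of_mem_set hr with h1 | h1
    · exact hrow _ h1
    · subst h1
      rw [PySem.List.length_pySetD, PySem.List.pyGetD_eq_getElem _ _ hk0 hk]
      exact hrow _ (List.getElem_mem _)
  · exact hk0

lemma get_set2 (d : List (List (Option Char))) (k h r c : Int) (v : Option Char) (M : Int)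
    (hrow : ∀ row ∈ d, (row.length : Int) = M)
    (hk0 : 0 ≤ k) (hk : k < (d.length : Int)) (hh0 : 0 ≤ h) (hh : h < M)
    (hr0 : 0 ≤ r) (hr : r < (d.length : Int)) (hc0 : 0 ≤ c) (hc : c < M) :
    pvDpGet (pvDpSet d k h v) r c = if r = k ∧ c = h then v else pvDpGet d r c := by
  have hklen : PySem.List.pyGetD d k [] = d[k.toNat] := PySem.List.pyGetD_eq_getElem _ _ hk0 hk
  have hkM : ((d[k.toNat] : List (Option Char)).length : Int) = M := hrow _ (List.getElem_mem _)
  unfold pvDpGet pvDpSet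
  rw [pyGetD_pySetD _ _ _ _ _ hk0 hr0 hr]
  by_cases hrk : r = k
  · subst hrk
    rw [if_pos rfl, hklen, pyGetD_pySetD _ _ _ _ _ hh0 hc0 (by omega)]
    by_cases hch : c = h
    · simp [hch]
    · rw [if_neg hch, if_neg (by tauto)]
  · rw [if_neg hrk, if_neg (by tauto)]

lemma length_pvSetList (d : List (List (Option Char))) (ps : List (Int × Int)) :
    (pvSetList d ps).length = d.length := by
  induction ps generalizing d with
  | nil => rfl
  | cons p ps ih => rw [pvSetList, List.foldl_cons, ← pvSetList, ih, length_pvDpSet]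

lemma rowlen_pvSetList (d : List (List (Option Char))) (ps : List (Int × Int)) (M : Int)
    (hps : ∀ p ∈ ps, 0 ≤ p.1 ∧ p.1 < (d.length : Int))
    (hrow : ∀ row ∈ d, (row.length : Int) = M) :
    ∀ row ∈ pvSetList d ps, (row.length : Int) = M := by
  induction ps generalizing d with
  | nil => exact hrow
  | cons p ps ih =>
    rw [pvSetList, List.foldl_cons, ← pvSetList]
    refine ih _ ?_ ?_
    · intro q hq
      have := hps q (List.mem_cons_of_mem _ hq)
      rwa [length_pvDpSet]
    · exact rowlen_pvDpSet _ _ _ _ _ (hps p (List.mem_cons_self)).1 (hps p (List.mem_cons_self)).2 hrow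

lemma get_pvSetList (d : List (List (Option Char))) (ps : List (Int × Int)) (r c : Int) (M : Int)
    (hps : ∀ p ∈ ps, 0 ≤ p.1 ∧ p.1 < (d.length : Int) ∧ 0 ≤ p.2 ∧ p.2 < M)
    (hrow : ∀ row ∈ d, (row.length : Int) = M)
    (hr0 : 0 ≤ r) (hr : r < (d.length : Int)) (hc0 : 0 ≤ c) (hc : c < M) :
    pvDpGet (pvSetList d ps) r c =
      if (r, c) ∈ ps then some '#' else pvDpGet d r c := by
  induction ps generalizing d with
  | nil => simp [pvSetList]
  | cons p ps ih =>
    rw [pvSetList, List.foldl_cons, ← pvSetList]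
    obtain ⟨h1, h2, h3, h4⟩ := hps p List.mem_cons_self
    rw [ih _ (by intro q hq; have := hps q (List.mem_cons_of_mem _ hq); rwa [length_pvDpSet])
          (rowlen_pvDpSet _ _ _ _ _ h1 h2 hrow) (by rwa [length_pvDpSet]),
        get_set2 _ _ _ _ _ _ _ hrow h1 h2 h3 h4 hr0 hr hc0 hc]
    simp only [List.mem_cons]
    by_cases hm : (r, c) ∈ ps
    · simp [hm]
    · by_cases he : (r, c) = p
      · have : r = p.1 ∧ c = p.2 := by rw [← he]; exact ⟨rfl, rfl⟩
        simp [hm, this]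

      · have hne : ¬(r = p.1 ∧ c = p.2) := fun ⟨u, w⟩ => he (by rw [Prod.ext_iff]; exact ⟨u, w⟩)
        simp [hm, he, if_neg hne]

abbrev RingMem (i j r c : Int) : Prop :=
  i ≤ r ∧ r ≤ i+2 ∧ j ≤ c ∧ c ≤ j+2 ∧ ¬(r = i+1 ∧ c = j+1)

lemma mem_ringList (i j r c : Int) :
    ((r, c) ∈ [(i,j),(i,j+1),(i,j+2),(i+1,j),(i+1,j+2),(i+2,j),(i+2,j+1),(i+2,j+2)]) ↔ RingMem i j r c := by
  simp [RingMem, Prod.ext_iff]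
  omega

lemma length_pvMark (d : List (List (Option Char))) (i j : Int) :
    (pvMark d i j).length = d.length := by
  rw [pvMark_eq, length_pvSetList]

lemma ringList_bounds (d : List (List (Option Char))) (M i j : Int)
    (hi0 : 0 ≤ i) (hi : i + 3 ≤ (d.length : Int)) (hj0 : 0 ≤ j) (hj : j + 3 ≤ M) :
    ∀ p ∈ [(i,j),(i,j+1),(i,j+2),(i+1,j),(i+1,j+2),(i+2,j),(i+2,j+1),(i+2,j+2)],
      0 ≤ p.1 ∧ p.1 < (d.length : Int) ∧ 0 ≤ p.2 ∧ p.2 < M := by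
  intro p hp
  simp only [List.mem_cons, List.not_mem_nil, or_false] at hp
  rcases hp with h|h|h|h|h|h|h|h <;> subst h <;> refine ⟨by omega, by omega, by omega, by omega⟩

lemma rowlen_pvMark (d : List (List (Option Char))) (i j M : Int)
    (hi0 : 0 ≤ i) (hi : i + 3 ≤ (d.length : Int)) (hj0 : 0 ≤ j) (hj : j + 3 ≤ M)
    (hrow : ∀ row ∈ d, (row.length : Int) = M) :
    ∀ row ∈ pvMark d i j, (row.length : Int) = M := by
  rw [pvMark_eq]
  exact rowlen_pvSetList _ _ _ (fun p hp => ⟨(ringList_bounds d M i j hi0 hi hj0 hj p hp).1,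
    (ringList_bounds d M i j hi0 hi hj0 hj p hp).2.1⟩) hrow

lemma get_pvMark (d : List (List (Option Char))) (i j r c M : Int)
    (hrow : ∀ row ∈ d, (row.length : Int) = M)
    (hi0 : 0 ≤ i) (hi : i + 3 ≤ (d.length : Int)) (hj0 : 0 ≤ j) (hj : j + 3 ≤ M)
    (hr0 : 0 ≤ r) (hr : r < (d.length : Int)) (hc0 : 0 ≤ c) (hc : c < M) :
    pvDpGet (pvMark d i j) r c = if RingMem i j r c then some '#' else pvDpGet d r c := by
  rw [pvMark_eq, get_pvSetList _ _ _ _ _ (ringList_bounds d M i j hi0 hi hj0 hj) hrow hr0 hr hc0 hc]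
  simp only [mem_ringList]

def pvStep (dp : List (List (Option Char))) (d2 : List (List (Option Char))) (p : Int × Int) :
    List (List (Option Char)) :=
  if (pvCountRing dp p.1 p.2).2 = 8 then pvMark d2 p.1 p.2 else d2

lemma length_foldSteps (dp : List (List (Option Char))) (L : List (Int × Int))
    (d : List (List (Option Char))) : (L.foldl (pvStep dp) d).length = d.length := by
  induction L generalizing d with
  | nil => rfl
  | cons p L ih =>
    rw [List.foldl_cons, ih]
    unfold pvStep
    split_ifs <;> simp [length_pvMark]

lemma rowlen_foldSteps (dp : List (List (Option Char))) (L : List (Int × Int))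
    (d : List (List (Option Char))) (M : Int)
    (hL : ∀ p ∈ L, 0 ≤ p.1 ∧ p.1 + 3 ≤ (d.length : Int) ∧ 0 ≤ p.2 ∧ p.2 + 3 ≤ M)
    (hrow : ∀ row ∈ d, (row.length : Int) = M) :
    ∀ row ∈ L.foldl (pvStep dp) d, (row.length : Int) = M := by
  induction L generalizing d with
  | nil => exact hrow
  | cons p L ih =>
    rw [List.foldl_cons]
    obtain ⟨h1, h2, h3, h4⟩ := hL p List.mem_cons_self
    have hlen : (pvStep dp d p).length = d.length := by
      unfold pvStep; split_ifs <;> simp [length_pvMark]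
    refine ih _ (by intro q hq; have := hL q (List.mem_cons_of_mem _ hq); rwa [hlen]) ?_
    unfold pvStep
    split_ifs
    · exact rowlen_pvMark _ _ _ _ h1 h2 h3 h4 hrow
    · exact hrow

lemma get_foldSteps (dp : List (List (Option Char))) (L : List (Int × Int))
    (d : List (List (Option Char))) (r c M : Int)
    (hL : ∀ p ∈ L, 0 ≤ p.1 ∧ p.1 + 3 ≤ (d.length : Int) ∧ 0 ≤ p.2 ∧ p.2 + 3 ≤ M)
    (hrow : ∀ row ∈ d, (row.length : Int) = M)
    (hr0 : 0 ≤ r) (hr : r < (d.length : Int)) (hc0 : 0 ≤ c) (hc : c < M) :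
    pvDpGet (L.foldl (pvStep dp) d) r c =
      if L.any (fun p => decide ((pvCountRing dp p.1 p.2).2 = 8) && decide (RingMem p.1 p.2 r c))
      then some '#' else pvDpGet d r c := by
  induction L generalizing d with
  | nil => simp
  | cons p L ih =>
    rw [List.foldl_cons]
    obtain ⟨h1, h2, h3, h4⟩ := hL p List.mem_cons_self
    have hlen : (pvStep dp d p).length = d.length := by
      unfold pvStep; split_ifs <;> simp [length_pvMark]
    have hrow' : ∀ row ∈ pvStep dp d p, (row.length : Int) = M := by
      unfold pvStep; split_ifs
      · exact rowlen_pvMark _ _ _ _ h1 h2 h3 h4 hrow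
      · exact hrow
    rw [ih _ (by intro q hq; have := hL q (List.mem_cons_of_mem _ hq); rwa [hlen]) hrow'
          (by rwa [hlen])]
    have hget : pvDpGet (pvStep dp d p) r c =
        if (pvCountRing dp p.1 p.2).2 = 8 ∧ RingMem p.1 p.2 r c then some '#'
        else pvDpGet d r c := by
      unfold pvStep
      split_ifs with hc8 hrm hrm
      · rw [get_pvMark _ _ _ _ _ _ hrow h1 h2 h3 h4 hr0 hr hc0 hc, if_pos hrm.2]
      · rw [get_pvMark _ _ _ _ _ _ hrow h1 h2 h3 h4 hr0 hr hc0 hc,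
            if_neg (by tauto)]
      · exact absurd hrm.1 hc8
      · rfl
    rw [hget]
    by_cases hany : (L.any fun p => decide ((pvCountRing dp p.1 p.2).2 = 8) && decide (RingMem p.1 p.2 r c)) = true
    · rw [if_pos hany, if_pos (by rw [List.any_cons, hany, Bool.or_true])]
    · by_cases hp8 : (pvCountRing dp p.1 p.2).2 = 8 ∧ RingMem p.1 p.2 r c
      · simp [List.any_cons, hany, hp8]
      · simp only [List.any_cons, hany, Bool.or_false]
        rw [if_neg hp8]
        by_cases hc8 : (pvCountRing dp p.1 p.2).2 = 8
        · have hrm : ¬ RingMem p.1 p.2 r c := fun h => hp8 ⟨hc8, h⟩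
          simp [hc8, hrm]
        · simp [hc8]

def pvDpOf (n m : Int) (grid : List String) : List (List (Option Char)) :=
  (PySem.List.pyRange 0 n 1).map (fun i =>
    (PySem.List.pyRange 0 m 1).map (fun j => pvCellA ((PySem.List.pyGet? grid i).getD "") j))

def pvInit (n m : Int) : List (List (Option Char)) :=
  (PySem.List.pyRange 0 n 1).map (fun _ => (PySem.List.pyRange 0 m 1).map (fun _ => (none : Option Char)))

def pvBlocks (n m : Int) : List (Int × Int) :=
  (PySem.List.pyRange 0 (n-2) 1).flatMap (fun i => (PySem.List.pyRange 0 (m-2) 1).map (fun j => (i, j)))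

lemma foldl_nested_pairs {γ : Type} (xs ys : List Int) (g : γ → Int × Int → γ) (init : γ) :
    xs.foldl (fun a i => ys.foldl (fun a j => g a (i, j)) a) init
      = (xs.flatMap (fun i => ys.map (fun j => (i, j)))).foldl g init := by
  induction xs generalizing init with
  | nil => rfl
  | cons x xs ih => simp [List.foldl_append, List.foldl_map, ih]

lemma logic2_eq (n m : Int) (grid : List String) :
    logic2 n m grid =
      if pvDpOf n m grid = (pvBlocks n m).foldl (pvStep (pvDpOf n m grid)) (pvInit n m)
      then "YES" else "NO" := by
  have h : logic2 n m grid =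
      if pvDpOf n m grid =
        (PySem.List.pyRange 0 (n-2) 1).foldl (fun a i =>
          (PySem.List.pyRange 0 (m-2) 1).foldl (fun a j => pvStep (pvDpOf n m grid) a (i, j)) a)
          (pvInit n m)
      then "YES" else "NO" := rfl
  rw [h, foldl_nested_pairs]
  rfl

lemma mem_pvBlocks (n m : Int) (p : Int × Int) :
    p ∈ pvBlocks n m ↔ 0 ≤ p.1 ∧ p.1 < n - 2 ∧ 0 ≤ p.2 ∧ p.2 < m - 2 := by
  simp only [pvBlocks, List.mem_flatMap, List.mem_map, PySem.List.mem_pyRange_one]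
  constructor
  · rintro ⟨i, hi, j, hj, rfl⟩
    exact ⟨hi.1, hi.2, hj.1, hj.2⟩
  · rintro ⟨h1, h2, h3, h4⟩
    exact ⟨p.1, ⟨h1, h2⟩, p.2, ⟨h3, h4⟩, rfl⟩

lemma length_pvDpOf (n m : Int) (grid : List String) : ((pvDpOf n m grid).length : Int) = (n.toNat : Int) := by
  simp [pvDpOf, PySem.List.length_pyRange_one]

lemma rowlen_pvDpOf (n m : Int) (grid : List String) :
    ∀ row ∈ pvDpOf n m grid, (row.length : Int) = (m.toNat : Int) := by
  intro row hrow
  simp only [pvDpOf, List.mem_map] at hrow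
  obtain ⟨i, _, rfl⟩ := hrow
  simp [PySem.List.length_pyRange_one]

lemma length_pvInit (n m : Int) : ((pvInit n m).length : Int) = (n.toNat : Int) := by
  simp [pvInit, PySem.List.length_pyRange_one]

lemma rowlen_pvInit (n m : Int) :
    ∀ row ∈ pvInit n m, (row.length : Int) = (m.toNat : Int) := by
  intro row hrow
  simp only [pvInit, List.mem_map] at hrow
  obtain ⟨i, _, rfl⟩ := hrow
  simp [PySem.List.length_pyRange_one]

lemma get_pvDpOf (n m : Int) (grid : List String) (r c : Int)
    (hr0 : 0 ≤ r) (hr : r < n) (hc0 : 0 ≤ c) (hc : c < m) :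
    pvDpGet (pvDpOf n m grid) r c =
      if pvCellAt grid r c = '.' then none else some (pvCellAt grid r c) := by
  unfold pvDpGet pvDpOf
  rw [PySem.List.pyGetD_map_pyRange_of_nonneg _ _ _ _ hr0 hr,
      PySem.List.pyGetD_map_pyRange_of_nonneg _ _ _ _ hc0 hc]
  simp [pvCellA, pvCellAt]

lemma get_pvInit (n m : Int) (r c : Int)
    (hr0 : 0 ≤ r) (hr : r < n) (hc0 : 0 ≤ c) (hc : c < m) :
    pvDpGet (pvInit n m) r c = none := by
  unfold pvDpGet pvInit
  rw [PySem.List.pyGetD_map_pyRange_of_nonneg _ _ _ _ hr0 hr,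
      PySem.List.pyGetD_map_pyRange_of_nonneg _ _ _ _ hc0 hc]

lemma fullRing_iff (grid : List String) (i j : Int) :
    pvFullRing grid i j = true ↔
      (pvCellAt grid i j = '#' ∧ pvCellAt grid i (j+1) = '#' ∧ pvCellAt grid i (j+2) = '#' ∧
       pvCellAt grid (i+1) j = '#' ∧ pvCellAt grid (i+1) (j+2) = '#' ∧
       pvCellAt grid (i+2) j = '#' ∧ pvCellAt grid (i+2) (j+1) = '#' ∧ pvCellAt grid (i+2) (j+2) = '#') := by
  have e1 : ¬((i : Int) = i + 1) := by omega
  have e2 : ¬((i + 2 : Int) = i + 1) := by omega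
  have e3 : ¬((j : Int) = j + 1) := by omega
  have e4 : ¬((j + 2 : Int) = j + 1) := by omega
  simp [pvFullRing, pyRange3, Prod.ext_iff, e1, e2, e3, e4]
  tauto

lemma cellhash (ch : Char) : ((if ch = '.' then none else some ch) = some '#') ↔ ch = '#' := by
  by_cases h : ch = '.'
  · subst h; simp
  · simp [h]

def pvCovA (n m : Int) (grid : List String) (r c : Int) : Prop :=
  ∃ i j : Int, 0 ≤ i ∧ i < n-2 ∧ 0 ≤ j ∧ j < m-2 ∧
    (pvCountRing (pvDpOf n m grid) i j).2 = 8 ∧ RingMem i j r c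

lemma count8_iff (n m : Int) (grid : List String) (i j : Int)
    (hi0 : 0 ≤ i) (hi : i < n - 2) (hj0 : 0 ≤ j) (hj : j < m - 2) :
    (pvCountRing (pvDpOf n m grid) i j).2 = 8 ↔ pvFullRing grid i j = true := by
  rw [countRing_eq_eight, fullRing_iff]
  rw [get_pvDpOf n m grid i j (by omega) (by omega) (by omega) (by omega),
      get_pvDpOf n m grid i (j+1) (by omega) (by omega) (by omega) (by omega),
      get_pvDpOf n m grid i (j+2) (by omega) (by omega) (by omega) (by omega),
      get_pvDpOf n m grid (i+1) j (by omega) (by omega) (by omega) (by omega),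
      get_pvDpOf n m grid (i+1) (j+2) (by omega) (by omega) (by omega) (by omega),
      get_pvDpOf n m grid (i+2) j (by omega) (by omega) (by omega) (by omega),
      get_pvDpOf n m grid (i+2) (j+1) (by omega) (by omega) (by omega) (by omega),
      get_pvDpOf n m grid (i+2) (j+2) (by omega) (by omega) (by omega) (by omega)]
  rw [cellhash, cellhash, cellhash, cellhash, cellhash, cellhash, cellhash, cellhash]

lemma covA_hash (n m : Int) (grid : List String) (r c : Int)
    (h : pvCovA n m grid r c) : pvCellAt grid r c = '#' := by
  obtain ⟨i, j, h1, h2, h3, h4, h8, hm⟩ := h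
  rw [count8_iff n m grid i j h1 h2 h3 h4, fullRing_iff] at h8
  obtain ⟨g1, g2, g3, g4, g5, g6, g7, g8⟩ := h8
  obtain ⟨m1, m2, m3, m4, m5⟩ := hm
  have hr : r = i ∨ r = i + 1 ∨ r = i + 2 := by omega
  have hc : c = j ∨ c = j + 1 ∨ c = j + 2 := by omega
  rcases hr with rfl | rfl | rfl <;> rcases hc with rfl | rfl | rfl <;> first
    | assumption
    | (exact absurd ⟨rfl, rfl⟩ m5)

lemma covered_iff (n m : Int) (grid : List String) (r c : Int)
    (hr0 : 0 ≤ r) (hr : r < n) (hc0 : 0 ≤ c) (hc : c < m) :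
    pvCovered n m grid r c = true ↔ pvCovA n m grid r c := by
  simp only [pvCovered, List.any_eq_true, PySem.List.mem_pyRange_one]
  constructor
  · rintro ⟨i, hi, j, hj, hij⟩
    by_cases hcen : ((i+1 : Int), (j+1 : Int)) = (r, c)
    · rw [if_pos hcen] at hij; exact absurd hij (by simp)
    · rw [if_neg hcen] at hij
      have hcen' : ¬(r = i + 1 ∧ c = j + 1) := by
        rintro ⟨u, w⟩; exact hcen (by rw [u, w])
      refine ⟨i, j, by omega, by omega, by omega, by omega, ?_, by unfold RingMem; omega⟩
      rw [count8_iff n m grid i j (by omega) (by omega) (by omega) (by omega)]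
      exact hij
  · rintro ⟨i, j, h1, h2, h3, h4, h8, hm⟩
    obtain ⟨m1, m2, m3, m4, m5⟩ := hm
    refine ⟨i, by omega, j, by omega, ?_⟩
    rw [if_neg (by rintro h; injection h with u w; exact m5 ⟨u.symm, w.symm⟩)]
    rw [count8_iff n m grid i j h1 h2 h3 h4] at h8
    exact h8

lemma eq_iff_get (d e : List (List (Option Char))) (M : Int)
    (hlen : d.length = e.length)
    (hrowd : ∀ row ∈ d, (row.length : Int) = M)
    (hrowe : ∀ row ∈ e, (row.length : Int) = M) :
    d = e ↔ (∀ r c : Int, 0 ≤ r → r < (d.length : Int) → 0 ≤ c → c < M →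
      pvDpGet d r c = pvDpGet e r c) := by
  constructor
  · rintro rfl; intros; rfl
  · intro h
    apply List.ext_getElem hlen
    intro k hk1 hk2
    have hdk : ((d[k].length : Int)) = M := hrowd _ (List.getElem_mem _)
    have hek : ((e[k].length : Int)) = M := hrowe _ (List.getElem_mem _)
    apply List.ext_getElem (by omega)
    intro l hl1 hl2
    have hh := h (k : Int) (l : Int) (by omega) (by simpa using hk1) (by omega) (by omega)
    unfold pvDpGet at hh
    rw [PySem.List.pyGetD_eq_getElem d ([] : List (Option Char)) (by omega) (by simpa using hk1),
        PySem.List.pyGetD_eq_getElem e ([] : List (Option Char)) (by omega) (by simpa using hk2)] at hh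
    simp only [Int.toNat_natCast] at hh
    rw [PySem.List.pyGetD_eq_getElem _ (none : Option Char) (by omega) (by simpa using hl1),
        PySem.List.pyGetD_eq_getElem _ (none : Option Char) (by omega) (by simpa using hl2)] at hh
    simpa using hh

lemma blocks_bounds (n m : Int) :
    ∀ p ∈ pvBlocks n m, 0 ≤ p.1 ∧ p.1 + 3 ≤ ((pvInit n m).length : Int) ∧ 0 ≤ p.2 ∧ p.2 + 3 ≤ ((m.toNat : Int)) := by
  intro p hp
  rw [mem_pvBlocks] at hp
  have h := length_pvInit n m
  refine ⟨hp.1, by omega, hp.2.2.1, by omega⟩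

lemma percell (n m : Int) (grid : List String) (r c : Int)
    (hr0 : 0 ≤ r) (hr : r < n) (hc0 : 0 ≤ c) (hc : c < m) :
    (pvDpGet (pvDpOf n m grid) r c =
      pvDpGet ((pvBlocks n m).foldl (pvStep (pvDpOf n m grid)) (pvInit n m)) r c) ↔
    pvCellOk n m grid r c = true := by
  have hinitlen := length_pvInit n m
  rw [get_pvDpOf n m grid r c hr0 hr hc0 hc,
      get_foldSteps (pvDpOf n m grid) (pvBlocks n m) (pvInit n m) r c (↑m.toNat)
        (blocks_bounds n m) (rowlen_pvInit n m) hr0 (by omega) hc0 (by omega),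
      get_pvInit n m r c hr0 hr hc0 hc]
  have hany : (((pvBlocks n m).any fun p =>
      decide ((pvCountRing (pvDpOf n m grid) p.1 p.2).2 = 8) && decide (RingMem p.1 p.2 r c)) = true)
      ↔ pvCovA n m grid r c := by
    simp only [List.any_eq_true, Bool.and_eq_true, decide_eq_true_eq, mem_pvBlocks]
    constructor
    · rintro ⟨p, ⟨b1, b2, b3, b4⟩, c8, rm⟩
      exact ⟨p.1, p.2, b1, b2, b3, b4, c8, rm⟩
    · rintro ⟨i, j, b1, b2, b3, b4, c8, rm⟩
      exact ⟨(i, j), ⟨b1, b2, b3, b4⟩, c8, rm⟩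
  by_cases hb : ((pvBlocks n m).any fun p =>
      decide ((pvCountRing (pvDpOf n m grid) p.1 p.2).2 = 8) && decide (RingMem p.1 p.2 r c)) = true
  · have hcov := hany.mp hb
    have hhash := covA_hash n m grid r c hcov
    have hcovB : pvCovered n m grid r c = true := (covered_iff n m grid r c hr0 hr hc0 hc).mpr hcov
    rw [if_pos hb, cellhash]
    simp [pvCellOk, hhash, hcovB]
  · have hcov : ¬ pvCovA n m grid r c := fun hh => hb (hany.mpr hh)
    have hcovB : pvCovered n m grid r c ≠ true := fun hh =>
      hcov ((covered_iff n m grid r c hr0 hr hc0 hc).mp hh)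
    simp only [hb, Bool.not_eq_true] at *
    by_cases hdot : pvCellAt grid r c = '.'
    · simp [hdot, pvCellOk]
    · simp [hdot, pvCellOk, hcovB]

theorem ports_eq (n m : Int) (grid : List String) : logic2 n m grid = logic2_alt n m grid := by
  rw [logic2_eq]
  have hinitlen := length_pvInit n m
  have hdplen := length_pvDpOf n m grid
  have hfoldlen := length_foldSteps (pvDpOf n m grid) (pvBlocks n m) (pvInit n m)
  have hrowfold := rowlen_foldSteps (pvDpOf n m grid) (pvBlocks n m) (pvInit n m) (↑m.toNat)
      (blocks_bounds n m) (rowlen_pvInit n m)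
  have hget := eq_iff_get (pvDpOf n m grid)
      ((pvBlocks n m).foldl (pvStep (pvDpOf n m grid)) (pvInit n m)) (↑m.toNat)
      (by omega) (rowlen_pvDpOf n m grid) hrowfold
  have hall : ((((PySem.List.pyRange 0 n 1).flatMap fun r =>
      (PySem.List.pyRange 0 m 1).map fun c => pvCellOk n m grid r c).all fun b => b) = true) ↔
      (∀ r c : Int, 0 ≤ r → r < n → 0 ≤ c → c < m → pvCellOk n m grid r c = true) := by
    simp only [List.all_eq_true, List.mem_flatMap, List.mem_map, PySem.List.mem_pyRange_one]
    constructor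
    · intro h r c h1 h2 h3 h4
      exact h _ ⟨r, ⟨h1, h2⟩, c, ⟨h3, h4⟩, rfl⟩
    · rintro h b ⟨r, hr, c, hc, rfl⟩
      exact h r c hr.1 hr.2 hc.1 hc.2
  have hiff : (∀ r c : Int, 0 ≤ r → r < ((pvDpOf n m grid).length : Int) → 0 ≤ c → c < (↑m.toNat : Int) →
      pvDpGet (pvDpOf n m grid) r c =
        pvDpGet ((pvBlocks n m).foldl (pvStep (pvDpOf n m grid)) (pvInit n m)) r c) ↔
      (∀ r c : Int, 0 ≤ r → r < n → 0 ≤ c → c < m → pvCellOk n m grid r c = true) := by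
    constructor
    · intro h r c h1 h2 h3 h4
      exact (percell n m grid r c h1 h2 h3 h4).mp (h r c h1 (by omega) h3 (by omega))
    · intro h r c h1 h2 h3 h4
      exact (percell n m grid r c h1 (by omega) h3 (by omega)).mpr (h r c h1 (by omega) h3 (by omega))
  unfold logic2_alt
  by_cases hx : pvDpOf n m grid = (pvBlocks n m).foldl (pvStep (pvDpOf n m grid)) (pvInit n m)
  · rw [if_pos hx, if_pos (hall.mpr (hiff.mp (hget.mp hx)))]
  · rw [if_neg hx, if_neg (fun hh => hx (hget.mpr (hiff.mpr (hall.mp hh))))]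

-- ===== VERDICT (by name: the statement is the Claim_ definition above) =====
theorem logic2_spec : Claim_equal_logic2 := by
  intro n m grid _ _
  unfold Spec_logic2
  exact ports_eq n m grid
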